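-- pv_equiv track=rewrite | github.com/jcalarcon-nova/novabot | process_web_documentation.py | determine_priority
-- ===== SOURCE A (Python) =====
-- def determine_priority(content_type: str, content: str) -> str:
--     """Determine priority based on content type and content."""
--     content_lower = content.lower()
--
--     # High priority for essential setup and configuration
--     if content_type in ["overview", "installation", "configuration"]:
--         return "high"
--
--     # High priority for troubleshooting and errors
--     if content_type == "troubleshooting" or any(word in content_lower for word in
--         ["error", "issue", "problem", "troubleshoot", "fail", "debug"]):
--         return "high"
--
--     # Medium priority for monitoring and operational content
--     if content_type in ["monitoring", "dashboard", "architecture"]: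
--         return "medium"
--
--     # Medium priority for connector and integration specifics
--     if content_type in ["connector", "integration"]:
--         return "medium"
--
--     # Low priority for general documentation and optimization
--     if content_type in ["ootb-assets", "cost-optimization"]:
--         return "low"
--
--     return "medium"  # Default
-- ===== SOURCE B (Python) =====
-- _PRIORITY = {
--     "overview": "high", "installation": "high", "configuration": "high",
--     "troubleshooting": "high",
--     "monitoring": "medium", "dashboard": "medium", "architecture": "medium",
--     "connector": "medium", "integration": "medium",
--     "ootb-assets": "low", "cost-optimization": "low",
-- }
--
-- _KEYWORDS = ("error", "issue", "problem", "troubleshoot", "fail", "debug")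
--
--
-- def determine_priority(content_type: str, content: str) -> str:
--     """Determine priority based on content type and content."""
--     content_lower = content.lower()
--     if any(word in content_lower for word in _KEYWORDS):
--         return "high"
--     return _PRIORITY.get(content_type, "medium")
-- ===== Notes on version B (the rewrite author's own statement) =====
-- stated objective: simpler
-- what changed: Replaced the five sequential membership branches by one hoisted keyword guard (safe because a keyword hit always yields 'high', even for medium/low types) plus a single priority table lookup with a 'medium' default.
import Mathlib
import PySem

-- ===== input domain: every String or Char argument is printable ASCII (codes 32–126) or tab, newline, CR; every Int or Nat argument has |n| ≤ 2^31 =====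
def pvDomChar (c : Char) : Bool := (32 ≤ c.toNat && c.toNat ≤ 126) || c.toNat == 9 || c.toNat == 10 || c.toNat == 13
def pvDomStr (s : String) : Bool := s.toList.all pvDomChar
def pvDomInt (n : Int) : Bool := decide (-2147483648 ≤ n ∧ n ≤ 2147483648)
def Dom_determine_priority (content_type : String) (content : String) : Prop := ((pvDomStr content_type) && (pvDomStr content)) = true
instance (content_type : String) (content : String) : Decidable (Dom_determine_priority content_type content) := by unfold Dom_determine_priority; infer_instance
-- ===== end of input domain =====

-- B replaces A's five sequential membership branches by one hoisted keyword guard plus a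
-- single priority-table lookup with a "medium" default (objective: simpler).

-- ===== PORT A =====
def determine_priority (content_type : String) (content : String) : String :=
  let content_lower := PySem.Str.lower content
  if content_type ∈ ["overview", "installation", "configuration"] then "high"
  else if content_type == "troubleshooting"
       || (["error", "issue", "problem", "troubleshoot", "fail", "debug"].any
            (fun word => PySem.Str.isIn word content_lower)) then "high"
  else if content_type ∈ ["monitoring", "dashboard", "architecture"] then "medium"
  else if content_type ∈ ["connector", "integration"] then "medium"
  else if content_type ∈ ["ootb-assets", "cost-optimization"] then "low"
  else "medium"

-- ===== PORT B =====
def pvPriorityTable : PySem.Dict String String :=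
  PySem.Dict.ofList
    [("overview", "high"), ("installation", "high"), ("configuration", "high"),
     ("troubleshooting", "high"),
     ("monitoring", "medium"), ("dashboard", "medium"), ("architecture", "medium"),
     ("connector", "medium"), ("integration", "medium"),
     ("ootb-assets", "low"), ("cost-optimization", "low")]

def determine_priority_alt (content_type : String) (content : String) : String :=
  let content_lower := PySem.Str.lower content
  if ["error", "issue", "problem", "troubleshoot", "fail", "debug"].any
       (fun word => PySem.Str.isIn word content_lower) then "high"
  else PySem.Dict.getD pvPriorityTable content_type "medium"

-- ===== PRECONDITION & SPEC =====
def Spec_determine_priority (content_type : String) (content : String) (out : String) : Prop := out = determine_priority_alt content_type content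
instance (content_type : String) (content : String) (out : String) : Decidable (Spec_determine_priority content_type content out) := by unfold Spec_determine_priority; infer_instance

-- ===== CLAIM (what is proved, stated in full; the proofs are below) =====
def Claim_equal_determine_priority : Prop := ∀ (content_type : String) (content : String), Dom_determine_priority content_type content → Spec_determine_priority content_type content (determine_priority content_type content)

-- ===== LEMMAS AND PROOFS =====

-- unused table lookup on a key that is none of the table's keys yields the default
lemma table_miss (t : String)
    (h1 : t ≠ "overview") (h2 : t ≠ "installation") (h3 : t ≠ "configuration")
    (h4 : t ≠ "troubleshooting") (h5 : t ≠ "monitoring") (h6 : t ≠ "dashboard")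
    (h7 : t ≠ "architecture") (h8 : t ≠ "connector") (h9 : t ≠ "integration")
    (h10 : t ≠ "ootb-assets") (h11 : t ≠ "cost-optimization") :
    PySem.Dict.getD pvPriorityTable t "medium" = "medium" := by
  have e1 : ("overview" == t) = false := by simp [Ne.symm h1]
  have e2 : ("installation" == t) = false := by simp [Ne.symm h2]
  have e3 : ("configuration" == t) = false := by simp [Ne.symm h3]
  have e4 : ("troubleshooting" == t) = false := by simp [Ne.symm h4]
  have e5 : ("monitoring" == t) = false := by simp [Ne.symm h5]
  have e6 : ("dashboard" == t) = false := by simp [Ne.symm h6]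
  have e7 : ("architecture" == t) = false := by simp [Ne.symm h7]
  have e8 : ("connector" == t) = false := by simp [Ne.symm h8]
  have e9 : ("integration" == t) = false := by simp [Ne.symm h9]
  have e10 : ("ootb-assets" == t) = false := by simp [Ne.symm h10]
  have e11 : ("cost-optimization" == t) = false := by simp [Ne.symm h11]
  simp [pvPriorityTable, PySem.Dict.ofList, PySem.Dict.empty, PySem.Dict.update,
    PySem.Dict.insert, PySem.Dict.contains, PySem.Dict.getD, PySem.Dict.get?,
    List.find?, List.foldl, e1, e2, e3, e4, e5, e6, e7, e8, e9, e10, e11]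

-- ===== VERDICT (by name: the statement is the Claim_ definition above) =====
theorem determine_priority_spec : Claim_equal_determine_priority := by
  intro content_type content _
  unfold Spec_determine_priority determine_priority determine_priority_alt
  simp only [List.mem_cons, List.not_mem_nil, or_false]
  by_cases hkw : (["error", "issue", "problem", "troubleshoot", "fail", "debug"].any
      (fun word => PySem.Str.isIn word (PySem.Str.lower content))) = true
  · simp only [hkw, Bool.or_true, if_true]
    split_ifs <;> rfl
  · simp only [Bool.not_eq_true] at hkw
    simp only [hkw, Bool.or_false]
    by_cases h1 : content_type = "overview"
    · subst h1; decide
    by_cases h2 : content_type = "installation"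
    · subst h2; decide
    by_cases h3 : content_type = "configuration"
    · subst h3; decide
    by_cases h4 : content_type = "troubleshooting"
    · subst h4; decide
    by_cases h5 : content_type = "monitoring"
    · subst h5; decide
    by_cases h6 : content_type = "dashboard"
    · subst h6; decide
    by_cases h7 : content_type = "architecture"
    · subst h7; decide
    by_cases h8 : content_type = "connector"
    · subst h8; decide
    by_cases h9 : content_type = "integration"
    · subst h9; decide
    by_cases h10 : content_type = "ootb-assets"
    · subst h10; decide
    by_cases h11 : content_type = "cost-optimization"
    · subst h11; decide
    rw [table_miss content_type h1 h2 h3 h4 h5 h6 h7 h8 h9 h10 h11]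
    simp [h1, h2, h3, h4, h5, h6, h7, h8, h9, h10, h11]
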